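-- pv_equiv track=rewrite | github.com/BHARATHMUTHYALA/Interesting-Computer-Networks | WEEK 1/calculate_parity.py | bit_stuffing_with_error_detection
-- ===== SOURCE A (Python) =====
-- def calculate_parity(data):
--     ones_count = data.count('1')
--
--     return '0' if ones_count%2==0 else '1'
--
-- def dynamic_escape_char(data):
--
--     possible_escape_chars=['1101101','1101010','01110110']
--     sequence_count={esc: data.count(esc) for esc in possible_escape_chars}
--
--     for escape_char in  sorted(sequence_count, key=sequence_count.get):
--         if escape_char not in data:
--             return escape_char
--     least_used_character =  min(sequence_count, key=sequence_count.get)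
--
--
--
--     modified_least_used_Character = least_used_character + '0'
--     return modified_least_used_Character if modified_least_used_Character not in data else least_used_character
--
-- def bit_stuffing_with_error_detection(data):
--     escape_char = dynamic_escape_char(data)
--     stuffed_data, count='',0
--
--     for bit in data:
--         stuffed_data +=bit
--         if bit=='1':
--             count+=1
--             if count==5:
--                 stuffed_data+=escape_char
--                 count=1
--         else:
--             count=0
--
--
--     parity_bit = calculate_parity(data)
--     flag_sequence='01111110'
--     framed_data= flag_sequence + stuffed_data + parity_bit + flag_sequence
--
--     return framed_data, escape_char, parity_bit
-- ===== SOURCE B (Python) =====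
-- def calculate_parity(data):
--     ones_count = data.count('1')
--
--     return '0' if ones_count%2==0 else '1'
--
-- def dynamic_escape_char(data):
--
--     possible_escape_chars=['1101101','1101010','01110110']
--     sequence_count={esc: data.count(esc) for esc in possible_escape_chars}
--
--     for escape_char in  sorted(sequence_count, key=sequence_count.get):
--         if escape_char not in data:
--             return escape_char
--     least_used_character =  min(sequence_count, key=sequence_count.get)
--
--     modified_least_used_Character = least_used_character + '0'
--     return modified_least_used_Character if modified_least_used_Character not in data else least_used_character
--
-- def bit_stuffing_with_error_detection(data):
--     # Run-based stuffing: split data into maximal runs of '1's; a run of k ones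
--     # gets the escape after the 5th, 9th, 13th, ... one, rebuilt in closed form.
--     escape_char = dynamic_escape_char(data)
--     pieces = []
--     i, n = 0, len(data)
--     while i < n:
--         if data[i] != '1':
--             pieces.append(data[i])
--             i += 1
--         else:
--             j = i
--             while j < n and data[j] == '1':
--                 j += 1
--             k = j - i
--             if k < 5:
--                 pieces.append('1' * k)
--             else:
--                 q, r = divmod(k - 5, 4)
--                 pieces.append('11111' + escape_char + ('1111' + escape_char) * q + '1' * r)
--             i = j
--     stuffed_data = ''.join(pieces)
--     parity_bit = calculate_parity(data)
--     flag_sequence = '01111110'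
--     framed_data = flag_sequence + stuffed_data + parity_bit + flag_sequence
--     return framed_data, escape_char, parity_bit
-- ===== Notes on version B (the rewrite author's own statement) =====
-- stated objective: alternative
-- what changed: The char-by-char counter loop with repeated string append is replaced by a run-based scan: each maximal run of k consecutive ones is rebuilt in closed form as a leading block of five ones then q blocks of four ones, each block followed by the escape string, plus the r leftover ones; parity and escape-char selection are kept as in A.
import Mathlib
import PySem

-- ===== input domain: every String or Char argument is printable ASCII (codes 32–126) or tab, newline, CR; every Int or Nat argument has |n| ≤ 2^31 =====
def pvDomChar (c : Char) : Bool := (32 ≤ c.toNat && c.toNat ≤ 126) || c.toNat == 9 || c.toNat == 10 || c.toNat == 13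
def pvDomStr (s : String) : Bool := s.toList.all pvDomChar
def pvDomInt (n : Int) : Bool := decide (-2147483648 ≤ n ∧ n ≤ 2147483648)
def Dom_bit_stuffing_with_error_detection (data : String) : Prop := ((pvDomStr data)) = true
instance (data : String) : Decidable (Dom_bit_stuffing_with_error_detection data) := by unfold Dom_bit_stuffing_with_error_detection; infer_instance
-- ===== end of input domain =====

-- B replaces A's char-by-char counter loop with a run-based stuffing (maximal runs of '1's
-- rebuilt in closed form with the escape after the 5th, 9th, 13th, … one); objective: alternative.

-- ===== PORT A =====
-- helpers shared by both ports: Source B keeps calculate_parity and dynamic_escape_char verbatim.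
def pyCalculateParity (data : String) : List Char :=
  let ones_count : Int := (PySem.Str.count data "1" : Int)
  if PySem.Int.mod ones_count 2 = 0 then ['0'] else ['1']

def pyEscCandidates : List (List Char) :=
  [['1','1','0','1','1','0','1'], ['1','1','0','1','0','1','0'], ['0','1','1','1','0','1','1','0']]

-- the Python 'for … : if esc not in data: return esc' early-return loop
def pyFirstNotIn (data : List Char) : List (List Char) → Option (List Char)
  | [] => none
  | e :: t => if PySem.Chars.isIn e data then pyFirstNotIn data t else some e

def pyDynamicEscapeChar (data : String) : List Char :=
  let seq : PySem.Dict (List Char) Int :=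
    PySem.Dict.ofList (pyEscCandidates.map (fun e => (e, (PySem.Chars.count data.toList e : Int))))
  -- sorted(sequence_count, key=sequence_count.get): keys sorted by their counts (all keys present, so .get = getD)
  match pyFirstNotIn data.toList (PySem.List.sorted seq.keys (fun e => seq.getD e 0) false) with
  | some e => e
  | none =>
    match PySem.List.min? seq.keys (fun e => seq.getD e 0) with
    | some least =>
      let modified := least ++ ['0']
      if PySem.Chars.isIn modified data.toList then least else modified
    | none => []   -- unreachable: the dict always has three keys

def pyFlag : List Char := ['0','1','1','1','1','1','1','0']

-- A's loop body: stuffed_data += bit; count bookkeeping; escape after the 5th consecutive '1', count reset to 1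
def pyStuffStepA (esc : List Char) (st : List Char × Int) (bit : Char) : List Char × Int :=
  let s := st.1 ++ [bit]
  if bit = '1' then
    if st.2 + 1 = 5 then (s ++ esc, 1) else (s, st.2 + 1)
  else (s, 0)

def bit_stuffing_with_error_detection (data : String) : String × String × String :=
  let esc := pyDynamicEscapeChar data
  let stuffed := (data.toList.foldl (pyStuffStepA esc) ([], 0)).1
  let parity := pyCalculateParity data
  (String.ofList (pyFlag ++ stuffed ++ parity ++ pyFlag), String.ofList esc, String.ofList parity)

-- ===== PORT B =====
-- closed-form rebuild of one maximal run of k ones (Source B: '1'*k, or '11111'+esc+('1111'+esc)*q+'1'*r)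
def pyEncRun (esc : List Char) (k : Nat) : List Char :=
  if k < 5 then List.replicate k '1'
  else List.replicate 5 '1' ++ esc ++
       (List.replicate ((k - 5) / 4) (List.replicate 4 '1' ++ esc)).flatten ++
       List.replicate ((k - 5) % 4) '1'

-- Source B's outer scan: copy a non-'1' char, or consume a whole run of '1's at once
def pyStuffRuns (esc : List Char) : List Char → List Char
  | [] => []
  | b :: t =>
    if b = '1' then
      pyEncRun esc (List.takeWhile (· = '1') (b :: t)).length ++
        pyStuffRuns esc (List.dropWhile (· = '1') (b :: t))
    else b :: pyStuffRuns esc t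
termination_by l => l.length
decreasing_by
  · simp_all [List.dropWhile]
    exact List.length_dropWhile_le _ _
  · simp

def bit_stuffing_with_error_detection_alt (data : String) : String × String × String :=
  let esc := pyDynamicEscapeChar data
  let stuffed := pyStuffRuns esc data.toList
  let parity := pyCalculateParity data
  (String.ofList (pyFlag ++ stuffed ++ parity ++ pyFlag), String.ofList esc, String.ofList parity)

-- ===== PRECONDITION & SPEC =====
def Spec_bit_stuffing_with_error_detection (data : String) (out : String × String × String) : Prop := out = bit_stuffing_with_error_detection_alt data
instance (data : String) (out : String × String × String) : Decidable (Spec_bit_stuffing_with_error_detection data out) := by unfold Spec_bit_stuffing_with_error_detection; infer_instance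

-- ===== CLAIM (what is proved, stated in full; the proofs are below) =====
def Claim_equal_bit_stuffing_with_error_detection : Prop := ∀ (data : String), Dom_bit_stuffing_with_error_detection data → Spec_bit_stuffing_with_error_detection data (bit_stuffing_with_error_detection data)

-- ===== LEMMAS AND PROOFS =====

-- reference form of A's loop: the result list as a counter-indexed recursion
def stuffR (esc : List Char) (c : Int) : List Char → List Char
  | [] => []
  | b :: t =>
    if b = '1' then
      if c + 1 = 5 then b :: (esc ++ stuffR esc 1 t) else b :: stuffR esc (c + 1) t
    else b :: stuffR esc 0 t

theorem foldA_eq_stuffR (esc : List Char) (l : List Char) :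
    ∀ (s : List Char) (c : Int), (l.foldl (pyStuffStepA esc) (s, c)).1 = s ++ stuffR esc c l := by
  induction l with
  | nil => intro s c; simp [stuffR]
  | cons b t ih =>
    intro s c
    simp only [List.foldl_cons, pyStuffStepA, stuffR]
    by_cases hb : b = '1' <;> simp [hb]
    · by_cases h5 : c + 1 = 5 <;> simp [h5, ih]
    · simp [ih]

theorem stuffR_reset (esc : List Char) (rest : List Char)
    (h : ∀ x, rest.head? = some x → x ≠ '1') (c : Int) :
    stuffR esc c rest = stuffR esc 0 rest := by
  cases rest with
  | nil => rfl
  | cons b t =>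
    have hb : b ≠ '1' := h b rfl
    simp [stuffR, hb]

theorem stuffR_small (esc : List Char) (k : Nat) :
    ∀ (c : Int) (rest : List Char), 0 ≤ c → c + k ≤ 4 →
    stuffR esc c (List.replicate k '1' ++ rest) = List.replicate k '1' ++ stuffR esc (c + k) rest := by
  induction k with
  | zero => intro c rest _ _; simp
  | succ n ih =>
    intro c rest hc hk
    have h5 : ¬ (c + 1 = 5) := by omega
    simp only [List.replicate_succ, List.cons_append, stuffR, if_neg h5]
    rw [ih (c + 1) rest (by omega) (by push_cast at hk ⊢; omega)]
    have hc : c + 1 + (n : Int) = c + ((n + 1 : Nat) : Int) := by push_cast; ring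
    rw [hc]
    simp

theorem stuffR_five (esc : List Char) (m : Nat) (rest : List Char) :
    stuffR esc 0 (List.replicate (5 + m) '1' ++ rest) =
      List.replicate 5 '1' ++ esc ++ stuffR esc 1 (List.replicate m '1' ++ rest) := by
  rw [List.replicate_add]
  simp [stuffR, List.replicate]

theorem stuffR_four (esc : List Char) (m : Nat) (rest : List Char) :
    stuffR esc 1 (List.replicate (4 + m) '1' ++ rest) =
      List.replicate 4 '1' ++ esc ++ stuffR esc 1 (List.replicate m '1' ++ rest) := by
  rw [List.replicate_add]
  simp [stuffR, List.replicate]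

theorem stuffR_loop1 (esc : List Char) (m : Nat) (rest : List Char)
    (h : ∀ x, rest.head? = some x → x ≠ '1') :
    stuffR esc 1 (List.replicate m '1' ++ rest) =
      (List.replicate (m / 4) (List.replicate 4 '1' ++ esc)).flatten ++
        List.replicate (m % 4) '1' ++ stuffR esc 0 rest := by
  induction m using Nat.strong_induction_on with
  | _ m ih =>
    by_cases hm : m < 4
    · have h4 : m / 4 = 0 := Nat.div_eq_of_lt hm
      have h4' : m % 4 = m := Nat.mod_eq_of_lt hm
      rw [stuffR_small esc m 1 rest (by omega) (by omega), stuffR_reset esc rest h]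
      simp [h4, h4']
    · obtain ⟨m', rfl⟩ : ∃ m', m = 4 + m' := ⟨m - 4, by omega⟩
      rw [stuffR_four, ih m' (by omega)]
      have hd : (4 + m') / 4 = 1 + m' / 4 := by omega
      have hm' : (4 + m') % 4 = m' % 4 := Nat.add_mod_left 4 m'
      rw [hd, hm', List.replicate_add, List.flatten_append]
      simp [List.append_assoc]

theorem stuffR_run (esc : List Char) (k : Nat) (rest : List Char)
    (h : ∀ x, rest.head? = some x → x ≠ '1') :
    stuffR esc 0 (List.replicate k '1' ++ rest) = pyEncRun esc k ++ stuffR esc 0 rest := by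
  by_cases hk : k < 5
  · rw [stuffR_small esc k 0 rest (by omega) (by omega), stuffR_reset esc rest h]
    simp [pyEncRun, hk]
  · obtain ⟨m, rfl⟩ : ∃ m, k = 5 + m := ⟨k - 5, by omega⟩
    rw [stuffR_five, stuffR_loop1 esc m rest h]
    simp [pyEncRun, hk, List.append_assoc]

theorem stuffR_eq_runs_aux (esc : List Char) :
    ∀ (n : Nat) (l : List Char), l.length ≤ n → stuffR esc 0 l = pyStuffRuns esc l := by
  intro n
  induction n with
  | zero =>
    intro l hl
    have : l = [] := List.eq_nil_of_length_eq_zero (by omega)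
    subst this
    simp [stuffR, pyStuffRuns]
  | succ n ih =>
    intro l hl
    cases l with
    | nil => simp [stuffR, pyStuffRuns]
    | cons b t =>
      by_cases hb : b = '1'
      · subst hb
        have hrep : List.takeWhile (fun x => decide (x = '1')) ('1' :: t) =
            List.replicate (List.takeWhile (fun x => decide (x = '1')) ('1' :: t)).length '1' := by
          apply List.eq_replicate_of_mem
          intro x hx
          simpa using List.mem_takeWhile_imp hx
        have hhead : ∀ x, (List.dropWhile (fun x => decide (x = '1')) ('1' :: t)).head? = some x → x ≠ '1' := by
          intro x hx
          have := List.head?_dropWhile_not (fun x => decide (x = '1')) ('1' :: t)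
          simp_all
        calc stuffR esc 0 ('1' :: t)
            = stuffR esc 0 (List.takeWhile (fun x => decide (x = '1')) ('1' :: t) ++
                List.dropWhile (fun x => decide (x = '1')) ('1' :: t)) := by
              rw [List.takeWhile_append_dropWhile]
          _ = pyEncRun esc (List.takeWhile (fun x => decide (x = '1')) ('1' :: t)).length ++
                stuffR esc 0 (List.dropWhile (fun x => decide (x = '1')) ('1' :: t)) := by
              conv_lhs => rw [hrep]
              rw [stuffR_run esc _ _ hhead, ← List.length_replicate
                (n := (List.takeWhile (fun x => decide (x = '1')) ('1' :: t)).length) (a := '1'), ← hrep]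
          _ = pyStuffRuns esc ('1' :: t) := by
              have hdw : List.dropWhile (fun x => decide (x = '1')) ('1' :: t) =
                  t.dropWhile (fun x => decide (x = '1')) := by simp
              have hlt : t.length ≤ n := by simp at hl; omega
              rw [ih (List.dropWhile (fun x => decide (x = '1')) ('1' :: t))
                (by rw [hdw]; exact le_trans (List.length_dropWhile_le _ _) hlt)]
              conv_rhs => rw [pyStuffRuns]
              simp
      · have ht : stuffR esc 0 t = pyStuffRuns esc t := ih t (by simp at hl; omega)
        conv_rhs => rw [pyStuffRuns]
        simp [stuffR, hb, ht]

theorem stuffR_eq_runs (esc : List Char) (l : List Char) : stuffR esc 0 l = pyStuffRuns esc l :=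
  stuffR_eq_runs_aux esc l.length l le_rfl

-- ===== VERDICT (by name: the statement is the Claim_ definition above) =====
theorem bit_stuffing_with_error_detection_spec : Claim_equal_bit_stuffing_with_error_detection := by
  intro data _
  unfold Spec_bit_stuffing_with_error_detection
  simp only [bit_stuffing_with_error_detection, bit_stuffing_with_error_detection_alt,
    foldA_eq_stuffR, stuffR_eq_runs, List.nil_append]
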